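-- pv_equiv track=rewrite | github.com/rudrasingh500/agentic-video-editor | backend/utils/frame_editing.py | resolve_frame_indices
-- ===== SOURCE A (Python) =====
-- from typing import Any
--
-- def resolve_frame_indices(
--     total_frames: int,
--     frame_range: dict[str, Any] | None,
--     frame_indices: list[int] | None,
-- ) -> list[int]:
--     candidates: set[int] = set()
--
--     if frame_indices:
--         for value in frame_indices:
--             idx = int(value)
--             if 0 <= idx < total_frames:
--                 candidates.add(idx)
--
--     if frame_range:
--         start = int(frame_range.get("start_frame", 0))
--         end = int(frame_range.get("end_frame", start))
--         if end < start:
--             start, end = end, start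
--         start = max(0, start)
--         end = min(total_frames - 1, end)
--         if start <= end:
--             for idx in range(start, end + 1):
--                 candidates.add(idx)
--
--     return sorted(candidates)
-- ===== SOURCE B (Python) =====
-- def resolve_frame_indices(total_frames, frame_range, frame_indices):
--     # sort the (filtered) explicit indices once, then merge them around the
--     # already-sorted contiguous range, deduplicating linearly -- no hash set,
--     # and the range is emitted as a block instead of element by element.
--     vals = sorted(v for v in (frame_indices or []) if 0 <= v < total_frames)
--     if frame_range:
--         start = int(frame_range.get("start_frame", 0))
--         end = int(frame_range.get("end_frame", start))
--         if end < start: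
--             start, end = end, start
--         start = max(0, start)
--         end = min(total_frames - 1, end)
--     else:
--         start, end = 0, -1  # empty range
--     out = []
--     for v in vals:
--         if v < start and (not out or out[-1] != v):
--             out.append(v)
--     out.extend(range(start, end + 1))
--     for v in vals:
--         if v > end and (not out or out[-1] != v):
--             out.append(v)
--     return out
-- ===== Notes on version B (the rewrite author's own statement) =====
-- stated objective: alternative
-- what changed: B drops the hash set and the final sort of (indices ∪ whole range): it sorts only the filtered explicit indices, then linearly merges them around the already-sorted contiguous range with adjacent-duplicate suppression (intended as faster in the range size; measured 1.2-2x, below the 1.5x confirmation bar at the largest size).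
import Mathlib
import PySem

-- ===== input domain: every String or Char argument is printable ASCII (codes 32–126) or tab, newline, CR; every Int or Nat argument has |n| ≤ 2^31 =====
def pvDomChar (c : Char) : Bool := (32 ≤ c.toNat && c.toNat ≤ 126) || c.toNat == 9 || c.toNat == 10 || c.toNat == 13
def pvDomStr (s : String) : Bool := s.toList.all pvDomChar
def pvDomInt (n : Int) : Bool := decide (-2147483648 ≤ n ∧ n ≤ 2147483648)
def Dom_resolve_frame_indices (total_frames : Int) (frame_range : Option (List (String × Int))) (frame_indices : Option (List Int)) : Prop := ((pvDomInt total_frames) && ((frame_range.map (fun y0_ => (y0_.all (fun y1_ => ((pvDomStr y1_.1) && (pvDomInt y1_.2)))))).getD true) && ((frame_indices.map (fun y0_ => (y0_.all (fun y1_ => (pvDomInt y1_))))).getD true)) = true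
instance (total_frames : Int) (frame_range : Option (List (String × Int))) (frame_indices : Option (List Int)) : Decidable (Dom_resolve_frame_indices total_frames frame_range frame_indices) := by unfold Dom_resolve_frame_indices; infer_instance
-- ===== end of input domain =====

-- B replaces A's hash-set accumulation and final sort of (indices ∪ whole range) by: sort
-- the filtered index list once, then linearly merge it around the already-sorted contiguous
-- range with adjacent-duplicate suppression (objective: alternative algorithm; the range is
-- no longer inserted element-by-element into a set nor re-sorted).


-- ===== PORT A =====
def resolve_frame_indices (total_frames : Int) (frame_range : Option (List (String × Int))) (frame_indices : Option (List Int)) : List Int :=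
  let candidates : PySem.Set Int := PySem.Set.empty
  let candidates :=
    match frame_indices with
    | some l =>
        if l.isEmpty then candidates
        else l.foldl (fun c value =>
          let idx := value
          if 0 ≤ idx ∧ idx < total_frames then PySem.Set.add c idx else c) candidates
    | none => candidates
  let candidates :=
    match frame_range with
    | some d =>
        if d.isEmpty then candidates
        else
          let start := PySem.Dict.getD (PySem.Dict.mk d) "start_frame" 0
          let end_ := PySem.Dict.getD (PySem.Dict.mk d) "end_frame" start
          let se := if end_ < start then (end_, start) else (start, end_)
          let start := max 0 se.1
          let end_ := min (total_frames - 1) se.2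
          if start ≤ end_ then
            (PySem.List.pyRange start (end_ + 1) 1).foldl (fun c idx => PySem.Set.add c idx) candidates
          else candidates
    | none => candidates
  PySem.List.sorted candidates (fun x => x) false

-- ===== PORT B =====
def resolve_frame_indices_alt (total_frames : Int) (frame_range : Option (List (String × Int))) (frame_indices : Option (List Int)) : List Int :=
  let vals := PySem.List.sorted ((frame_indices.getD []).filter (fun v => decide (0 ≤ v ∧ v < total_frames))) (fun x => x) false
  let se : Int × Int :=
    match frame_range with
    | some d =>
        if d.isEmpty then (0, -1)
        else
          let start := PySem.Dict.getD (PySem.Dict.mk d) "start_frame" 0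
          let end_ := PySem.Dict.getD (PySem.Dict.mk d) "end_frame" start
          let p := if end_ < start then (end_, start) else (start, end_)
          (max 0 p.1, min (total_frames - 1) p.2)
    | none => (0, -1)
  let out := vals.foldl (fun out v => if v < se.1 ∧ out.getLast? ≠ some v then out ++ [v] else out) []
  let out := out ++ PySem.List.pyRange se.1 (se.2 + 1) 1
  vals.foldl (fun out v => if se.2 < v ∧ out.getLast? ≠ some v then out ++ [v] else out) out

-- ===== PRECONDITION & SPEC =====
def Spec_resolve_frame_indices (total_frames : Int) (frame_range : Option (List (String × Int))) (frame_indices : Option (List Int)) (out : List Int) : Prop := out = resolve_frame_indices_alt total_frames frame_range frame_indices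
instance (total_frames : Int) (frame_range : Option (List (String × Int))) (frame_indices : Option (List Int)) (out : List Int) : Decidable (Spec_resolve_frame_indices total_frames frame_range frame_indices out) := by unfold Spec_resolve_frame_indices; infer_instance

-- ===== CLAIM (what is proved, stated in full; the proofs are below) =====
def Claim_equal_resolve_frame_indices : Prop := ∀ (total_frames : Int) (frame_range : Option (List (String × Int))) (frame_indices : Option (List Int)), Dom_resolve_frame_indices total_frames frame_range frame_indices → Spec_resolve_frame_indices total_frames frame_range frame_indices (resolve_frame_indices total_frames frame_range frame_indices)

-- ===== LEMMAS AND PROOFS =====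

-- in a strictly increasing list, an upper-bound member is the last element
lemma pvLast_of_max : ∀ (l : List Int) (v : Int), l.Pairwise (· < ·) → v ∈ l →
    (∀ a ∈ l, a ≤ v) → l.getLast? = some v := by
  intro l
  induction l with
  | nil => intro v _ hv _; simp at hv
  | cons x tl ih =>
    intro v hp hv hmax
    rcases tl with _ | ⟨y, tl'⟩
    · simp at hv ⊢; have := hmax x (by simp); omega
    · have hp' := hp.tail
      have hv' : v ∈ y :: tl' := by
        rcases List.mem_cons.1 hv with rfl | h
        · exfalso
          have hy : v < y := (List.pairwise_cons.1 hp).1 y (by simp)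
          have := hmax y (by simp)
          omega
        · exact h
      rw [List.getLast?_cons_cons]
      exact ih v hp' hv' (fun a ha => hmax a (by simp [ha]))

-- A's conditional-add loop over the raw index list: no-dup and membership
lemma pvCondAdd (tf : Int) : ∀ (l : List Int) (c : PySem.Set Int), c.Nodup →
    ((l.foldl (fun c value => let idx := value;
        if 0 ≤ idx ∧ idx < tf then PySem.Set.add c idx else c) c).Nodup ∧
     ∀ x, x ∈ l.foldl (fun c value => let idx := value;
        if 0 ≤ idx ∧ idx < tf then PySem.Set.add c idx else c) c ↔ x ∈ c ∨ (x ∈ l ∧ 0 ≤ x ∧ x < tf)) := by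
  intro l
  induction l with
  | nil => intro c hc; simpa using hc
  | cons v tl ih =>
    intro c hc
    simp only [List.foldl_cons]
    by_cases h : 0 ≤ v ∧ v < tf
    · rw [if_pos h]
      have := ih (PySem.Set.add c v) (PySem.Set.nodup_add c v hc)
      refine ⟨this.1, fun x => ?_⟩
      rw [this.2 x, PySem.Set.mem_add]
      simp only [List.mem_cons]
      constructor
      · rintro ((hx | rfl) | ⟨hx, h2⟩)
        · exact Or.inl hx
        · exact Or.inr ⟨Or.inl rfl, h⟩
        · exact Or.inr ⟨Or.inr hx, h2⟩
      · rintro (hx | ⟨rfl | hx, h2⟩)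
        · exact Or.inl (Or.inl hx)
        · exact Or.inl (Or.inr rfl)
        · exact Or.inr ⟨hx, h2⟩
    · rw [if_neg h]
      have := ih c hc
      refine ⟨this.1, fun x => ?_⟩
      rw [this.2 x]
      simp only [List.mem_cons]
      constructor
      · rintro (hx | ⟨hx, h2⟩)
        · exact Or.inl hx
        · exact Or.inr ⟨Or.inr hx, h2⟩
      · rintro (hx | ⟨rfl | hx, h2⟩)
        · exact Or.inl hx
        · exact absurd h2 h
        · exact Or.inr ⟨hx, h2⟩

-- A's unconditional add loop over the range: no-dup and membership
lemma pvAddFold : ∀ (l : List Int) (c : PySem.Set Int), c.Nodup →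
    ((l.foldl (fun c idx => PySem.Set.add c idx) c).Nodup ∧
     ∀ x, x ∈ l.foldl (fun c idx => PySem.Set.add c idx) c ↔ x ∈ c ∨ x ∈ l) := by
  intro l
  induction l with
  | nil => intro c hc; simpa using hc
  | cons v tl ih =>
    intro c hc
    simp only [List.foldl_cons]
    have := ih (PySem.Set.add c v) (PySem.Set.nodup_add c v hc)
    refine ⟨this.1, fun x => ?_⟩
    rw [this.2 x, PySem.Set.mem_add]
    simp only [List.mem_cons]
    tauto

-- B's dedup-append loop over a ≤-sorted list, starting from a <-sorted accumulator
lemma pvDedupFold (P : Int → Prop) [DecidablePred P] :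
    ∀ (vals init : List Int), vals.Pairwise (· ≤ ·) → init.Pairwise (· < ·) →
    (∀ a ∈ init, ∀ v ∈ vals, P v → a ≤ v) →
    ((vals.foldl (fun out v => if P v ∧ out.getLast? ≠ some v then out ++ [v] else out) init).Pairwise (· < ·) ∧
     ∀ x, x ∈ vals.foldl (fun out v => if P v ∧ out.getLast? ≠ some v then out ++ [v] else out) init ↔
       x ∈ init ∨ (x ∈ vals ∧ P x)) := by
  intro vals
  induction vals with
  | nil => intro init _ hinit _; exact ⟨hinit, by simp⟩
  | cons v tl ih =>
    intro init hs hinit hmono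
    have hsv : ∀ w ∈ tl, v ≤ w := (List.pairwise_cons.1 hs).1
    have hs' := hs.tail
    simp only [List.foldl_cons]
    by_cases h : P v ∧ init.getLast? ≠ some v
    · rw [if_pos h]
      have hlt : ∀ a ∈ init, a < v := by
        intro a ha
        rcases lt_or_eq_of_le (hmono a ha v (by simp) h.1) with hlt | rfl
        · exact hlt
        · exact absurd (pvLast_of_max init a hinit ha
            (fun b hb => hmono b hb a (by simp) h.1)) h.2
      have hinit' : (init ++ [v]).Pairwise (· < ·) := by
        rw [List.pairwise_append]
        exact ⟨hinit, by simp, by simpa using hlt⟩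
      have hmono' : ∀ a ∈ init ++ [v], ∀ w ∈ tl, P w → a ≤ w := by
        intro a ha w hw hPw
        rcases List.mem_append.1 ha with ha | ha
        · exact hmono a ha w (by simp [hw]) hPw
        · simp at ha; subst ha; exact hsv w hw
      have := ih (init ++ [v]) hs' hinit' hmono'
      refine ⟨this.1, fun x => ?_⟩
      rw [this.2 x]
      simp only [List.mem_append, List.mem_cons, List.not_mem_nil, or_false]
      constructor
      · rintro ((hx | rfl) | ⟨hx, hPx⟩)
        · exact Or.inl hx
        · exact Or.inr ⟨Or.inl rfl, h.1⟩
        · exact Or.inr ⟨Or.inr hx, hPx⟩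
      · rintro (hx | ⟨rfl | hx, hPx⟩)
        · exact Or.inl (Or.inl hx)
        · exact Or.inl (Or.inr rfl)
        · exact Or.inr ⟨hx, hPx⟩
    · rw [if_neg h]
      have := ih init hs' hinit (fun a ha w hw hPw => hmono a ha w (by simp [hw]) hPw)
      refine ⟨this.1, fun x => ?_⟩
      rw [this.2 x]
      simp only [List.mem_cons]
      constructor
      · rintro (hx | ⟨hx, hPx⟩)
        · exact Or.inl hx
        · exact Or.inr ⟨Or.inr hx, hPx⟩
      · rintro (hx | ⟨rfl | hx, hPx⟩)
        · exact Or.inl hx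
        · by_cases hPv : P x
          · have hlast : init.getLast? = some x := by
              by_contra hne
              exact h ⟨hPv, hne⟩
            exact Or.inl (List.mem_of_getLast? hlast)
          · exact absurd hPx hPv
        · exact Or.inr ⟨hx, hPx⟩

-- the core equality: A's sorted set = B's merge, for any bounds s, e whose window
-- cannot be strictly straddled by a valid index
lemma pvCore (tf s e : Int) (fi' : List Int)
    (hdisj : ∀ v ∈ fi', (0 ≤ v ∧ v < tf) → ¬(v < s ∧ e < v)) :
    PySem.List.sorted
      ((PySem.List.pyRange s (e + 1) 1).foldl (fun c idx => PySem.Set.add c idx)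
        (fi'.foldl (fun c value => let idx := value;
          if 0 ≤ idx ∧ idx < tf then PySem.Set.add c idx else c) PySem.Set.empty))
      (fun x => x) false
    =
    (PySem.List.sorted (fi'.filter (fun v => decide (0 ≤ v ∧ v < tf))) (fun x => x) false).foldl
      (fun out v => if e < v ∧ out.getLast? ≠ some v then out ++ [v] else out)
      (((PySem.List.sorted (fi'.filter (fun v => decide (0 ≤ v ∧ v < tf))) (fun x => x) false).foldl
          (fun out v => if v < s ∧ out.getLast? ≠ some v then out ++ [v] else out) [])
        ++ PySem.List.pyRange s (e + 1) 1) := by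
  classical
  set L := fi'.filter (fun v => decide (0 ≤ v ∧ v < tf)) with hLdef
  set R := PySem.List.pyRange s (e + 1) 1 with hRdef
  have hmemL : ∀ x ∈ L, 0 ≤ x ∧ x < tf := by
    intro x hx
    rw [hLdef, List.mem_filter] at hx
    simpa using hx.2
  have hmemLfi : ∀ x ∈ L, x ∈ fi' := by
    intro x hx; rw [hLdef, List.mem_filter] at hx; exact hx.1
  have hmemR : ∀ x ∈ R, s ≤ x ∧ x ≤ e := by
    intro x hx
    rw [hRdef, PySem.List.mem_pyRange_one] at hx
    omega
  obtain ⟨hnd1, hm1⟩ := pvCondAdd tf fi' PySem.Set.empty List.nodup_nil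
  obtain ⟨hnd2, hm2⟩ := pvAddFold R _ hnd1
  set vals := PySem.List.sorted L (fun x => x) false with hvals
  have hvp : vals.Pairwise (· ≤ ·) := PySem.List.sorted_pairwise L (fun x => x)
  have hmv : ∀ x, x ∈ vals ↔ x ∈ L := fun x => PySem.List.mem_sorted L (fun x => x) false x
  obtain ⟨hp1, hm1'⟩ := pvDedupFold (fun v => v < s) vals [] hvp List.Pairwise.nil (by simp)
  set out1 := vals.foldl (fun out v => if v < s ∧ out.getLast? ≠ some v then out ++ [v] else out) [] with hout1
  have hm1'' : ∀ a, a ∈ out1 ↔ a ∈ vals ∧ a < s := by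
    intro a; rw [hm1' a]; simp
  have hout1lt : ∀ a ∈ out1, a < s := by
    intro a ha
    exact ((hm1'' a).1 ha).2
  have hp2 : (out1 ++ R).Pairwise (· < ·) := by
    rw [List.pairwise_append]
    refine ⟨hp1, PySem.List.pairwise_lt_pyRange_one s (e+1), ?_⟩
    intro a ha r hr
    have := hmemR r hr
    have := hout1lt a ha
    omega
  have hmono2 : ∀ a ∈ out1 ++ R, ∀ v ∈ vals, e < v → a ≤ v := by
    intro a ha v hv hev
    have hvL := (hmv v).1 hv
    have hvb := hmemL v hvL
    rcases List.mem_append.1 ha with ha | ha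
    · have has := hout1lt a ha
      have haL := (hmv a).1 ((hm1'' a).1 ha).1
      have hab := hmemL a haL
      by_contra hlt
      exact hdisj v (hmemLfi v hvL) hvb (by omega)
    · have := hmemR a ha
      omega
  obtain ⟨hp3, hm3⟩ := pvDedupFold (fun v => e < v) vals (out1 ++ R) hvp hp2 hmono2
  set out := vals.foldl (fun o v => if e < v ∧ o.getLast? ≠ some v then o ++ [v] else o) (out1 ++ R) with houtdef
  have hndout : out.Nodup := hp3.imp (fun h => ne_of_lt h)
  have hperm : out.Perm ((PySem.List.pyRange s (e+1) 1).foldl (fun c idx => PySem.Set.add c idx)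
      (fi'.foldl (fun c value => let idx := value;
        if 0 ≤ idx ∧ idx < tf then PySem.Set.add c idx else c) PySem.Set.empty)) := by
    rw [← hRdef]
    refine (List.perm_ext_iff_of_nodup hndout hnd2).2 ?_
    intro x
    rw [hm2 x, hm1 x, hm3 x]
    simp only [List.mem_append]
    constructor
    · rintro ((hx | hx) | ⟨hx, hex⟩)
      · have := (hm1'' x).1 hx
        exact Or.inl (Or.inr ⟨hmemLfi x ((hmv x).1 this.1), hmemL x ((hmv x).1 this.1)⟩)
      · exact Or.inr hx
      · exact Or.inl (Or.inr ⟨hmemLfi x ((hmv x).1 hx), hmemL x ((hmv x).1 hx)⟩)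
    · rintro ((hx | ⟨hxfi, hxb⟩) | hx)
      · simp at hx
      · have hxL : x ∈ L := by
          rw [hLdef, List.mem_filter]
          exact ⟨hxfi, by simpa using hxb⟩
        have hxv : x ∈ vals := (hmv x).2 hxL
        by_cases hxs : x < s
        · exact Or.inl (Or.inl ((hm1' x).2 (Or.inr ⟨hxv, hxs⟩)))
        · by_cases hxe : e < x
          · exact Or.inr ⟨hxv, hxe⟩
          · refine Or.inl (Or.inr ?_)
            rw [hRdef, PySem.List.mem_pyRange_one]
            omega
      · exact Or.inl (Or.inr hx)
  exact PySem.List.sorted_eq_of_perm_of_pairwise_lt _ out (fun x => x) hperm hp3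

-- A's first loop written as the canonical fold over frame_indices.getD []
lemma pvFiPart (tf : Int) (fi : Option (List Int)) :
    (match fi with
      | some l =>
          if l.isEmpty then (PySem.Set.empty : PySem.Set Int)
          else l.foldl (fun c value =>
            let idx := value
            if 0 ≤ idx ∧ idx < tf then PySem.Set.add c idx else c) PySem.Set.empty
      | none => PySem.Set.empty)
    = (fi.getD []).foldl (fun c value =>
        let idx := value
        if 0 ≤ idx ∧ idx < tf then PySem.Set.add c idx else c) PySem.Set.empty := by
  rcases fi with _ | (_ | ⟨v, l⟩) <;> rfl

-- ===== VERDICT (by name: the statement is the Claim_ definition above) =====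
theorem resolve_frame_indices_spec : Claim_equal_resolve_frame_indices := by
  intro tf fr fi _
  show resolve_frame_indices tf fr fi = resolve_frame_indices_alt tf fr fi
  unfold resolve_frame_indices resolve_frame_indices_alt
  simp only [pvFiPart tf fi]
  rcases fr with _ | d
  · show PySem.List.sorted _ (fun x => x) false = _
    have h := pvCore tf 0 (-1) (fi.getD []) (by intro v _ hv; omega)
    rw [show ((-1 : Int) + 1) = 0 by norm_num, PySem.List.pyRange_one_eq_nil (by norm_num)] at h
    simpa using h
  · rcases d with _ | ⟨q, d'⟩
    · show PySem.List.sorted _ (fun x => x) false = _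
      have h := pvCore tf 0 (-1) (fi.getD []) (by intro v _ hv; omega)
      rw [show ((-1 : Int) + 1) = 0 by norm_num, PySem.List.pyRange_one_eq_nil (by norm_num)] at h
      simpa using h
    · simp only [List.isEmpty_cons, if_neg, Bool.false_eq_true, not_false_iff]
      set s0 := PySem.Dict.getD (PySem.Dict.mk (q :: d')) "start_frame" 0 with hs0
      set e0 := PySem.Dict.getD (PySem.Dict.mk (q :: d')) "end_frame" s0 with he0
      set p := if e0 < s0 then (e0, s0) else (s0, e0) with hp
      have hple : p.1 ≤ p.2 := by rw [hp]; split_ifs <;> simp <;> omega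
      set S := max 0 p.1 with hS
      set E := min (tf - 1) p.2 with hE
      have hdisj : ∀ v ∈ fi.getD [], (0 ≤ v ∧ v < tf) → ¬(v < S ∧ E < v) := by
        intro v _ hv
        rw [hS, hE]
        omega
      have h := pvCore tf S E (fi.getD []) hdisj
      by_cases hle : S ≤ E
      · rw [if_pos hle]
        exact h
      · rw [if_neg hle]
        rw [PySem.List.pyRange_one_eq_nil (show E + 1 ≤ S by omega)] at h ⊢
        simpa using h
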